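-- pv_equiv track=rewrite | github.com/thealper2/codewars-solutions | 7-kyu/three_cusion_billiards.py | has_scored
-- ===== SOURCE A (Python) =====
-- def has_scored(s):
--     cushions = []
--     object_balls = []
--
--     for l in s:
--         if l.islower():
--             cushions.append(l)
--         elif l.isupper() and l not in object_balls:
--             object_balls.append(l)
--
--         if len(object_balls) == 2:
--             return len(cushions) >= 3
--
--     return False
-- ===== SOURCE B (Python) =====
-- def has_scored(s):
--     # Pass 1: find the index where the 2nd distinct object ball first appears.
--     seen = set()
--     boundary = None
--     for i, ch in enumerate(s):
--         if ch.isupper() and ch not in seen: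
--             if len(seen) == 1:
--                 boundary = i
--                 break
--             seen.add(ch)
--     if boundary is None:
--         return False
--     # Pass 2: count cushions (lowercase) strictly before the boundary.
--     return sum(1 for ch in s[:boundary] if ch.islower()) >= 3
-- ===== Notes on version B (the rewrite author's own statement) =====
-- stated objective: alternative
-- what changed: Replaces A's single interleaved loop that accumulates a cushions list while tracking object balls with a find-boundary-then-count decomposition: one pass locates the index of the second distinct uppercase ball, a separate pass counts lowercase characters in the prefix before it.
import Mathlib
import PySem

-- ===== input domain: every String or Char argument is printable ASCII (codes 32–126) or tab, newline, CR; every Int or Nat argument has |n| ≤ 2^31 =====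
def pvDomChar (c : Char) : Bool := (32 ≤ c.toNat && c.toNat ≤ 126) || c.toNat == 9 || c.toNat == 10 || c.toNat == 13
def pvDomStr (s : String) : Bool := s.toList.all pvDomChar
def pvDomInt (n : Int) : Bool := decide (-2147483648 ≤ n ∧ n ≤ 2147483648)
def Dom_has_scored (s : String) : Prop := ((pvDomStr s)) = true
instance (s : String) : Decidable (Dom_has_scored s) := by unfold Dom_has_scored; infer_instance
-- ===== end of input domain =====

-- B restructures A's interleaved accumulate-while-scanning into find-the-boundary-then-count-prefix; same value everywhere (objective: alternative).

-- ===== PORT A =====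
-- A's loop: accumulate cushions (lowercase) and distinct object balls (uppercase), return as soon as two balls are seen.
def hasScoredLoop : List Char → List Char → List Char → Bool
  | [], _, _ => false
  | c :: rest, cushions, balls =>
    let st :=
      if PySem.Chars.islower c then (cushions ++ [c], balls)
      else if PySem.Chars.isupper c && !(balls.contains c) then (cushions, balls ++ [c])
      else (cushions, balls)
    if st.2.length = 2 then decide (st.1.length ≥ 3)
    else hasScoredLoop rest st.1 st.2

def has_scored (s : String) : Bool := hasScoredLoop s.toList [] []

-- ===== PORT B =====
-- Pass 1 of B: index of the first occurrence of the second distinct uppercase letter.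
def findSecondBall : List Char → List Char → Option Nat
  | [], _ => none
  | c :: rest, seen =>
    if PySem.Chars.isupper c && !(seen.contains c) then
      if seen.length = 1 then some 0
      else (findSecondBall rest (seen ++ [c])).map (· + 1)
    else (findSecondBall rest seen).map (· + 1)

def has_scored_alt (s : String) : Bool :=
  match findSecondBall s.toList [] with
  | none => false
  | some i => decide ((s.toList.take i).countP (fun c => PySem.Chars.islower c) ≥ 3)

-- ===== PRECONDITION & SPEC =====
def Spec_has_scored (s : String) (out : Bool) : Prop := out = has_scored_alt s
instance (s : String) (out : Bool) : Decidable (Spec_has_scored s out) := by unfold Spec_has_scored; infer_instance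

-- ===== CLAIM (what is proved, stated in full; the proofs are below) =====
def Claim_equal_has_scored : Prop := ∀ (s : String), Dom_has_scored s → Spec_has_scored s (has_scored s)

-- ===== LEMMAS AND PROOFS =====

theorem upper_not_lower (c : Char) (h : PySem.Chars.isupper c = true) :
    PySem.Chars.islower c = false := by
  simp [PySem.Chars.isupper, PySem.Chars.islower] at *
  intro h1
  exact absurd h1 (not_le.mpr (lt_of_le_of_lt h.2 (by decide)))

theorem hasScoredLoop_eq (l : List Char) : ∀ (cushions balls : List Char),
    balls.length ≤ 1 →
    hasScoredLoop l cushions balls =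
      match findSecondBall l balls with
      | none => false
      | some i => decide (cushions.length + (l.take i).countP (fun c => PySem.Chars.islower c) ≥ 3) := by
  induction l with
  | nil => intro cushions balls _; simp [hasScoredLoop, findSecondBall]
  | cons c rest ih =>
    intro cushions balls hb
    by_cases hlo : PySem.Chars.islower c = true
    · have hup : PySem.Chars.isupper c = false := by
        by_contra h
        have := upper_not_lower c (by revert h; cases PySem.Chars.isupper c <;> simp)
        simp [hlo] at this
      simp only [hasScoredLoop, findSecondBall, hlo, hup, Bool.false_and, if_pos]
      have h2 : balls.length ≠ 2 := by omega
      rw [if_neg (by simpa using h2)]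
      rw [ih (cushions ++ [c]) balls hb]
      cases h : findSecondBall rest balls with
      | none => simp
      | some i =>
        simp [hlo]
        omega
    · have hlo' : PySem.Chars.islower c = false := by revert hlo; cases PySem.Chars.islower c <;> simp
      by_cases hup : (PySem.Chars.isupper c && !(balls.contains c)) = true
      · by_cases h1 : balls.length = 1
        · -- second ball found here
          simp only [hasScoredLoop, findSecondBall, hlo', hup, if_pos, if_neg, Bool.false_eq_true,
            not_false_iff, h1]
          simp [h1]
        · -- first ball
          have h0 : balls.length = 0 := by omega
          simp only [hasScoredLoop, findSecondBall, hlo', hup, Bool.false_eq_true, if_neg,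
            not_false_iff, if_pos, h1, if_neg]
          have h2 : (balls ++ [c]).length ≠ 2 := by simp; omega
          rw [if_neg (by simpa using h2)]
          rw [ih cushions (balls ++ [c]) (by simp [h0])]
          cases h : findSecondBall rest (balls ++ [c]) with
          | none => simp
          | some i =>
            simp [hlo']
      · -- not lower, and not a fresh upper ball
        have hup' : (PySem.Chars.isupper c && !(balls.contains c)) = false := by
          revert hup; cases (PySem.Chars.isupper c && !(balls.contains c)) <;> simp
        simp only [hasScoredLoop, findSecondBall, hlo', hup', Bool.false_eq_true, if_neg,
          not_false_iff]
        have h2 : balls.length ≠ 2 := by omega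
        rw [if_neg (by simpa using h2)]
        rw [ih cushions balls hb]
        cases h : findSecondBall rest balls with
        | none => simp
        | some i => simp [hlo']

-- ===== VERDICT (by name: the statement is the Claim_ definition above) =====
theorem has_scored_spec : Claim_equal_has_scored := by
  intro s _
  unfold Spec_has_scored has_scored has_scored_alt
  rw [hasScoredLoop_eq s.toList [] [] (by simp)]
  cases h : findSecondBall s.toList [] <;> simp
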